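-- pv_equiv track=rewrite | github.com/omkarnica/capstone_rag_project | src/transcripts/retrieval.py | _build_transcript_context
-- ===== SOURCE A (Python) =====
-- _MAX_CONTEXT_CHARS = 10_000
--
-- def _build_transcript_context(hits: list[dict]) -> str:
--     """
--     Build a numbered context string from retrieved hits, capped at 10000 chars.
--
--     Each chunk is prefixed with a metadata header:
--     [N] Company | Period | Accession
--     """
--     parts: list[str] = []
--     total_chars = 0
--
--     for i, hit in enumerate(hits, start=1):
--         fields = hit.get("fields", {})
--         header = (
--             f"[{i}] {fields.get('company_title', 'Unknown')} | "
--             f"Period: {fields.get('period_of_report', 'N/A')} | "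
--             f"Accession: {fields.get('accession_no', 'N/A')}"
--         )
--         body = fields.get("text", "").strip()
--         chunk_str = f"{header}\n{body}\n"
--
--         if total_chars + len(chunk_str) > _MAX_CONTEXT_CHARS:
--             break
--         parts.append(chunk_str)
--         total_chars += len(chunk_str)
--
--     return "\n".join(parts)
-- ===== SOURCE B (Python) =====
-- _MAX_CONTEXT_CHARS = 10_000
--
--
-- def _format_chunk(i, hit):
--     fields = hit.get("fields", {})
--     header = (
--         f"[{i}] {fields.get('company_title', 'Unknown')} | "
--         f"Period: {fields.get('period_of_report', 'N/A')} | "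
--         f"Accession: {fields.get('accession_no', 'N/A')}"
--     )
--     return f"{header}\n{fields.get('text', '').strip()}\n"
--
--
-- def _build_transcript_context(hits: list[dict]) -> str:
--     chunks = [_format_chunk(i, hit) for i, hit in enumerate(hits, start=1)]
--     totals = []
--     running = 0
--     for chunk in chunks:
--         running += len(chunk)
--         totals.append(running)
--     keep = sum(1 for total in totals if total <= _MAX_CONTEXT_CHARS)
--     return "\n".join(chunks[:keep])
-- ===== Notes on version B (the rewrite author's own statement) =====
-- stated objective: alternative
-- what changed: A's single fused loop (format, test cap, break) is replaced by a three-phase pipeline: format every chunk up front, compute running cumulative lengths, then keep the prefix whose cumulative total stays within the cap and join it.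
import Mathlib
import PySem

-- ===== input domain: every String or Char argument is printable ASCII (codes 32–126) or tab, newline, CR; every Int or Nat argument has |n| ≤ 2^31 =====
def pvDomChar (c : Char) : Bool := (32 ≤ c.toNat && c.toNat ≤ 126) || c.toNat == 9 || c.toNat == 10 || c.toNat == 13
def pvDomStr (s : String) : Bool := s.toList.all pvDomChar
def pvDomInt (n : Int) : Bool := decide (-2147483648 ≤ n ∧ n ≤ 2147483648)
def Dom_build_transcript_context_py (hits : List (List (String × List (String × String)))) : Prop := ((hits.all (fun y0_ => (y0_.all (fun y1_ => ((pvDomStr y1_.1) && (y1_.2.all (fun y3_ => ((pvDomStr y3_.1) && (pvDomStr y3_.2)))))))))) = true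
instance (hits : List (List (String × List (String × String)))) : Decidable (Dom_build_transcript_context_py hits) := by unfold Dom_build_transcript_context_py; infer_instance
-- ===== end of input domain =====

-- B is a different decomposition of A (format all chunks, then cut by cumulative totals instead of
-- breaking inside a fused loop); same return value on every input, no speed claim.

-- shared helpers: dict lookup (first match in the association list) and the per-hit formatted chunk,
-- identical in both Pythons (A inlines the f-string, B's _format_chunk is the same expression)
def pvGetD {α : Type} (d : List (String × α)) (k : String) (df : α) : α :=
  ((d.find? (fun p => p.1 == k)).map (·.2)).getD df

def pvChunk (i : Nat) (hit : List (String × List (String × String))) : List Char :=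
  let fields := pvGetD hit "fields" []
  let header := "[".toList ++ PySem.Int.toChars (i : Int) ++ "] ".toList
      ++ (pvGetD fields "company_title" "Unknown").toList
      ++ " | Period: ".toList ++ (pvGetD fields "period_of_report" "N/A").toList
      ++ " | Accession: ".toList ++ (pvGetD fields "accession_no" "N/A").toList
  let body := PySem.Chars.strip (pvGetD fields "text" "").toList
  header ++ [Char.ofNat 10] ++ body ++ [Char.ofNat 10]

-- ===== PORT A =====
-- A's fused loop: enumerate from 1, break as soon as the next chunk would exceed the cap
def pvLoopA (rest : List (List (String × List (String × String)))) (i total : Nat)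
    (parts : List (List Char)) : List (List Char) :=
  match rest with
  | [] => parts
  | h :: t =>
    let c := pvChunk i h
    if total + c.length > 10000 then parts
    else pvLoopA t (i + 1) (total + c.length) (parts ++ [c])

def build_transcript_context_py (hits : List (List (String × List (String × String)))) : String :=
  String.ofList (PySem.Chars.join [Char.ofNat 10] (pvLoopA hits 1 0 []))

-- ===== PORT B =====
-- B phase 1: the comprehension [_format_chunk(i, hit) for i, hit in enumerate(hits, 1)]
def pvChunksB (i : Nat) : List (List (String × List (String × String))) → List (List Char)
  | [] => []
  | h :: t => pvChunk i h :: pvChunksB (i + 1) t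

def build_transcript_context_py_alt (hits : List (List (String × List (String × String)))) : String :=
  let chunks := pvChunksB 1 hits
  -- B phase 2: running cumulative totals
  let totals := (chunks.foldl (fun (st : Nat × List Nat) c =>
      (st.1 + c.length, st.2 ++ [st.1 + c.length])) (0, [])).2
  -- B phase 3: keep = how many totals stay within the cap, join that prefix
  let keep := totals.countP (fun t => decide (t ≤ 10000))
  String.ofList (PySem.Chars.join [Char.ofNat 10] (chunks.take keep))

-- ===== PRECONDITION & SPEC =====
def Spec_build_transcript_context_py (hits : List (List (String × List (String × String)))) (out : String) : Prop := out = build_transcript_context_py_alt hits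
instance (hits : List (List (String × List (String × String)))) (out : String) : Decidable (Spec_build_transcript_context_py hits out) := by unfold Spec_build_transcript_context_py; infer_instance

-- ===== CLAIM (what is proved, stated in full; the proofs are below) =====
def Claim_equal_build_transcript_context_py : Prop := ∀ (hits : List (List (String × List (String × String)))), Dom_build_transcript_context_py hits → Spec_build_transcript_context_py hits (build_transcript_context_py hits)

-- ===== LEMMAS AND PROOFS =====

-- cumulative totals of the chunk lengths, starting from t
def pvSums (t : Nat) : List (List Char) → List Nat
  | [] => []
  | c :: cs => (t + c.length) :: pvSums (t + c.length) cs

theorem pvFold_snd (cs : List (List Char)) : ∀ (t : Nat) (acc : List Nat),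
    (cs.foldl (fun (st : Nat × List Nat) c => (st.1 + c.length, st.2 ++ [st.1 + c.length])) (t, acc)).2
      = acc ++ pvSums t cs := by
  induction cs with
  | nil => intro t acc; simp [pvSums]
  | cons c cs ih => intro t acc; simp [List.foldl, pvSums, ih]

theorem pvSums_le (cs : List (List Char)) : ∀ (t : Nat), ∀ s ∈ pvSums t cs, t ≤ s := by
  induction cs with
  | nil => intro t s hs; simp [pvSums] at hs
  | cons c cs ih =>
    intro t s hs
    simp only [pvSums, List.mem_cons] at hs
    rcases hs with h | h
    · omega
    · have := ih (t + c.length) s h; omega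

theorem pvLoopA_eq (rest : List (List (String × List (String × String)))) :
    ∀ (i total : Nat) (parts : List (List Char)),
    pvLoopA rest i total parts
      = parts ++ (pvChunksB i rest).take
          ((pvSums total (pvChunksB i rest)).countP (fun t => decide (t ≤ 10000))) := by
  induction rest with
  | nil => intro i total parts; simp [pvLoopA, pvChunksB, pvSums]
  | cons h t ih =>
    intro i total parts
    simp only [pvLoopA, pvChunksB, pvSums]
    by_cases hc : total + (pvChunk i h).length > 10000
    · rw [if_pos hc]
      have hz : (pvSums (total + (pvChunk i h).length) (pvChunksB (i + 1) t)).countP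
          (fun t => decide (t ≤ 10000)) = 0 := by
        apply List.countP_eq_zero.mpr
        intro s hs
        have := pvSums_le _ _ s hs
        simp only [decide_eq_true_eq]
        omega
      rw [List.countP_cons_of_neg (by simp; omega), hz]
      simp
    · rw [if_neg hc]
      rw [List.countP_cons_of_pos (by simp; omega)]
      rw [List.take_succ_cons, ih]
      simp

-- ===== VERDICT (by name: the statement is the Claim_ definition above) =====
theorem build_transcript_context_py_spec : Claim_equal_build_transcript_context_py := by
  intro hits _
  simp only [Spec_build_transcript_context_py, build_transcript_context_py,
    build_transcript_context_py_alt, pvFold_snd, pvLoopA_eq, List.nil_append]
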